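-- pv_equiv track=rewrite | github.com/juwon8891/Coding_Test | programmers/tests.py | solution
-- ===== SOURCE A (Python) =====
-- def solution(word):
--     answer = 0
--     words = ["A", "E", "I", "O", "U"]
--
--     for i in range(len(word)):
--         # 길이가 i인 단어의 개수: 5^(i+1) - 1 / 4
--         cnt = (5**(i+1) - 1) // 4
--         # 이전 단어의 개수만큼 더함
--         answer += cnt
--
--         # word와 사전에서 앞선 단어를 찾기
--         if word[i] in words:
--             # 현재 글자의 인덱스를 찾음
--             idx = words.index(word[i])
--             # 현재 길이에서 word의 다음 글자까지의 모든 단어의 개수를 더함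
--             answer += idx * (5**(len(word)-i-1))
--
--     return answer
-- ===== SOURCE B (Python) =====
-- def solution(word):
--     vm = {"A": 0, "E": 1, "I": 2, "O": 3, "U": 4}
--     # offset: number of strictly shorter non-empty words plus the +1 per position
--     offset = 0
--     for i in range(len(word)):
--         offset += (5 ** (i + 1) - 1) // 4
--     # base-5 value of the word, digits read right-to-left with a running place
--     value = 0
--     place = 1
--     for ch in reversed(word):
--         value += vm.get(ch, 0) * place
--         place *= 5
--     return offset + value
-- ===== Notes on version B (the rewrite author's own statement) =====
-- stated objective: alternative
-- what changed: A accumulates everything in one loop indexing word[i] with list.index and per-step powers; B splits the result into a length-only offset pass plus a base-5 evaluation of the word traversed right-to-left with a running place multiplier and a vowel-to-digit dictionary.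
import Mathlib
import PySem

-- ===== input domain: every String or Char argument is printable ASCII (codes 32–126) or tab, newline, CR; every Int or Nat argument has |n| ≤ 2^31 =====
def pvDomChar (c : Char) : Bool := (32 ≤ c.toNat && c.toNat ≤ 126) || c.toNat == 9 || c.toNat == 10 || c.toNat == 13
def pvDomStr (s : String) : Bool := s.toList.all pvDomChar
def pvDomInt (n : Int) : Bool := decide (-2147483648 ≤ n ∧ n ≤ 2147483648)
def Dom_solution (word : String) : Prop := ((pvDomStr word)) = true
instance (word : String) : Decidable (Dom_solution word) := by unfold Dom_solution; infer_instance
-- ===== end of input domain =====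

-- B splits A's single accumulation into a closed length-offset pass plus a right-to-left
-- base-5 evaluation with a running place and a vowel→digit dictionary (objective: alternative decomposition).

-- ===== PORT A =====
-- words = ["A", "E", "I", "O", "U"]  (1-char strings; modelled as chars, word[i] is a char)
def wordsA : List Char := ['A', 'E', 'I', 'O', 'U']

-- literal port of A: one fold over range(len(word)); 5**(i+1) and 5**(len-i-1) are written
-- with .toNat exponents, exact because 0 ≤ i < len inside the range.
def solution (word : String) : Int :=
  let cs := word.toList
  let n : Int := PySem.Str.len word
  (PySem.List.pyRange 0 n 1).foldl
    (fun answer i =>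
      let cnt := PySem.Int.floordiv (5 ^ (i.toNat + 1) - 1) 4
      let answer := answer + cnt
      let c := PySem.List.pyGetD cs i ' '   -- word[i]; in range, default never used
      if c ∈ wordsA then
        match PySem.List.index? wordsA c with
        | some idx => answer + (idx : Int) * 5 ^ ((n - i - 1).toNat)
        | none => answer
      else answer)
    0

-- ===== PORT B =====
def vmB : PySem.Dict Char Int := PySem.Dict.ofList [('A', 0), ('E', 1), ('I', 2), ('O', 3), ('U', 4)]

def solution_alt (word : String) : Int :=
  let cs := word.toList
  let n : Int := PySem.Str.len word
  let offset :=
    (PySem.List.pyRange 0 n 1).foldl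
      (fun acc i => acc + PySem.Int.floordiv (5 ^ (i.toNat + 1) - 1) 4) 0
  let vp :=
    cs.reverse.foldl
      (fun (s : Int × Int) ch => (s.1 + PySem.Dict.getD vmB ch 0 * s.2, s.2 * 5)) (0, 1)
  offset + vp.1

-- ===== PRECONDITION & SPEC =====
def Spec_solution (word : String) (out : Int) : Prop := out = solution_alt word
instance (word : String) (out : Int) : Decidable (Spec_solution word out) := by unfold Spec_solution; infer_instance

-- ===== CLAIM (what is proved, stated in full; the proofs are below) =====
def Claim_equal_solution : Prop := ∀ (word : String), Dom_solution word → Spec_solution word (solution word)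

-- ===== LEMMAS AND PROOFS =====

-- digit value of a character as B computes it
def dB (c : Char) : Int := PySem.Dict.getD vmB c 0

-- A's per-character contribution equals B's dictionary lookup
lemma dA_eq_dB (c : Char) :
    (if c ∈ wordsA then
        match PySem.List.index? wordsA c with
        | some idx => (idx : Int)
        | none => 0
      else 0) = dB c := by
  by_cases h : c ∈ wordsA
  · fin_cases h <;> decide
  · simp only [h, if_false]
    simp only [wordsA, List.mem_cons, List.not_mem_nil, or_false, not_or] at h
    obtain ⟨h1, h2, h3, h4, h5⟩ := h
    have hv : vmB.items = [('A', 0), ('E', 1), ('I', 2), ('O', 3), ('U', 4)] := by decide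
    have b1 : ('A' == c) = false := by simp [Ne.symm h1]
    have b2 : ('E' == c) = false := by simp [Ne.symm h2]
    have b3 : ('I' == c) = false := by simp [Ne.symm h3]
    have b4 : ('O' == c) = false := by simp [Ne.symm h4]
    have b5 : ('U' == c) = false := by simp [Ne.symm h5]
    simp [dB, PySem.Dict.getD, PySem.Dict.get?, hv, List.find?, b1, b2, b3, b4, b5]

-- spec value of B's reversed fold
def valB : List Char → Int
  | [] => 0
  | c :: rest => dB c * 5 ^ rest.length + valB rest

lemma revFold_eq (cs : List Char) :
    cs.reverse.foldl
      (fun (s : Int × Int) ch => (s.1 + PySem.Dict.getD vmB ch 0 * s.2, s.2 * 5)) (0, 1)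
      = (valB cs, 5 ^ cs.length) := by
  rw [List.foldl_reverse]
  induction cs with
  | nil => simp [valB]
  | cons c rest ih =>
      simp only [List.foldr_cons, ih, valB, dB]
      rw [Prod.ext_iff]
      constructor
      · ring
      · simp [List.length_cons]; ring

lemma sum_range_eq_valB (cs : List Char) :
    ((List.range cs.length).map
        (fun k => dB (cs.getD k ' ') * 5 ^ (cs.length - 1 - k))).sum = valB cs := by
  induction cs with
  | nil => simp [valB]
  | cons c rest ih =>
      rw [valB, ← ih]
      rw [List.length_cons, List.range_succ_eq_map, List.map_cons, List.map_map, List.sum_cons]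
      congr 1
      apply congrArg
      apply List.map_congr_left
      intro k hk
      simp [Function.comp, Nat.sub_sub, Nat.add_comm]

theorem solution_eq (word : String) : solution word = solution_alt word := by
  simp only [solution, solution_alt]
  set cs := word.toList with hcs
  set n : Int := PySem.Str.len word with hn
  have hbody : ∀ (acc : Int), ∀ i ∈ PySem.List.pyRange 0 n 1,
      (if PySem.List.pyGetD cs i ' ' ∈ wordsA then
        match PySem.List.index? wordsA (PySem.List.pyGetD cs i ' ') with
        | some idx => acc + PySem.Int.floordiv (5 ^ (i.toNat + 1) - 1) 4 + (idx : Int) * 5 ^ (n - i - 1).toNat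
        | none => acc + PySem.Int.floordiv (5 ^ (i.toNat + 1) - 1) 4
      else acc + PySem.Int.floordiv (5 ^ (i.toNat + 1) - 1) 4)
      = acc + (PySem.Int.floordiv (5 ^ (i.toNat + 1) - 1) 4
          + dB (PySem.List.pyGetD cs i ' ') * 5 ^ (n - i - 1).toNat) := by
    intro acc i _
    have hd := dA_eq_dB (PySem.List.pyGetD cs i ' ')
    by_cases h : PySem.List.pyGetD cs i ' ' ∈ wordsA
    · have hs : (PySem.List.index? wordsA (PySem.List.pyGetD cs i ' ')).isSome = true :=
        (PySem.List.index?_isSome_iff _ _).2 h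
      obtain ⟨k, hk⟩ := Option.isSome_iff_exists.1 hs
      rw [if_pos h, hk] at hd ⊢
      rw [← hd]
      ring
    · rw [if_neg h] at hd ⊢
      rw [← hd]
      ring
  rw [PySem.List.foldl_congr_mem _ _ _ 0 hbody]
  rw [PySem.List.foldl_add, PySem.List.foldl_add, PySem.List.sum_map_add_int,
    revFold_eq]
  simp only [zero_add]
  congr 1
  -- digit sum = valB cs
  have hlen : n = (cs.length : Int) := by rw [hn, hcs, PySem.Str.len_eq]
  rw [hlen, PySem.List.pyRange_zero_nat, List.map_map, ← sum_range_eq_valB cs]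
  apply congrArg
  apply List.map_congr_left
  intro k hk
  have hklt : k < cs.length := List.mem_range.1 hk
  simp only [Function.comp, PySem.List.pyGetD_natCast]
  have he : ((cs.length : Int) - (k : Int) - 1).toNat = cs.length - 1 - k := by omega
  rw [he]

-- ===== VERDICT (by name: the statement is the Claim_ definition above) =====
theorem solution_spec : Claim_equal_solution := by
  intro word _
  unfold Spec_solution
  exact solution_eq word
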